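-- pv_equiv track=rewrite | github.com/keg-tucn/AMR | coreference_detection/coreference_sentence_extraction_from_datasets.py | get_dataset_names_ordered_the_same_as_dataset_file_names
-- ===== SOURCE A (Python) =====
-- def get_dataset_names_ordered_the_same_as_dataset_file_names(dataset_file_names, dataset_short_names):
--     ordered_dataset_names = []
--
--     for dataset_fname in dataset_file_names:
--         for dataset_name in dataset_short_names:
--             if dataset_name in dataset_fname:
--                 ordered_dataset_names.append(dataset_name)
--                 break
--
--     return ordered_dataset_names
-- ===== SOURCE B (Python) =====
-- def get_dataset_names_ordered_the_same_as_dataset_file_names(dataset_file_names, dataset_short_names):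
--     # Inverted loop order: sweep the short names once (in priority order) over a
--     # per-filename "chosen" table; the first sweep that matches a filename fixes it,
--     # and the sweeps stop as soon as every filename is settled.
--     chosen = [None] * len(dataset_file_names)
--     for nm in dataset_short_names:
--         if None not in chosen:
--             break
--         chosen = [nm if c is None and nm in f else c
--                   for c, f in zip(chosen, dataset_file_names)]
--     return [c for c in chosen if c is not None]
-- ===== Notes on version B (the rewrite author's own statement) =====
-- stated objective: alternative
-- what changed: B inverts the loop nesting: instead of scanning the short names per filename with a break, it makes one sweep per short name (in priority order) over a per-filename 'chosen' table, fixing each filename at its first matching sweep, then emits the non-empty entries.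
import Mathlib
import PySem

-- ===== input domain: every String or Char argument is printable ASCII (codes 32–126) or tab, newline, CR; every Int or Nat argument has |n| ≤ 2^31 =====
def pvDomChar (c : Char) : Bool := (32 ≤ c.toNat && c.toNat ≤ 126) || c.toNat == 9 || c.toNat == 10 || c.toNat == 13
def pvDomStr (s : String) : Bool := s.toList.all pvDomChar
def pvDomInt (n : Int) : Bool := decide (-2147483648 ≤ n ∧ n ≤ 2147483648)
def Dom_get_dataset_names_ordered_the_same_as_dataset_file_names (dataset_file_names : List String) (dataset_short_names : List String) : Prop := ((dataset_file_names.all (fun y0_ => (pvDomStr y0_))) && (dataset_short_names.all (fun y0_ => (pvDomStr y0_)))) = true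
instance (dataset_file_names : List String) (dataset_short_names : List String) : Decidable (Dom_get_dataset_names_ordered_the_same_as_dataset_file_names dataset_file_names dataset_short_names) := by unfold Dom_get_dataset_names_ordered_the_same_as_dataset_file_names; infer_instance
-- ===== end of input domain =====

-- B inverts the loop nesting (one sweep per short name over a per-filename "chosen" table)
-- instead of A's per-filename scan with break; objective: alternative structure, same cost.

-- ===== PORT A =====
-- inner 'for dataset_name in dataset_short_names: if … break' of A
def pvAInner (fname : String) : List String → Option String
  | [] => none
  | nm :: rest => if PySem.Str.isIn nm fname then some nm else pvAInner fname rest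

def get_dataset_names_ordered_the_same_as_dataset_file_names (dataset_file_names : List String) (dataset_short_names : List String) : List String :=
  dataset_file_names.foldl
    (fun acc fname =>
      match pvAInner fname dataset_short_names with
      | some nm => acc ++ [nm]
      | none => acc)
    []

-- ===== PORT B =====
-- one comprehension sweep of Source B: chosen = [nm if c is None and nm in f else c for c, f in zip(chosen, files)]
def pvBSweep (files : List String) (chosen : List (Option String)) (nm : String) : List (Option String) :=
  (chosen.zip files).map (fun p => if p.1 = none ∧ PySem.Str.isIn nm p.2 then some nm else p.1)

-- Source B's 'for nm in …: if None not in chosen: break; chosen = [sweep]' loop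
def pvBLoop (files : List String) : List String → List (Option String) → List (Option String)
  | [], chosen => chosen
  | nm :: rest, chosen =>
    if ¬ chosen.contains none then chosen
    else pvBLoop files rest (pvBSweep files chosen nm)

def get_dataset_names_ordered_the_same_as_dataset_file_names_alt (dataset_file_names : List String) (dataset_short_names : List String) : List String :=
  let chosen := pvBLoop dataset_file_names dataset_short_names
    (dataset_file_names.map (fun _ => (none : Option String)))
  chosen.filterMap id

-- ===== PRECONDITION & SPEC =====
def Spec_get_dataset_names_ordered_the_same_as_dataset_file_names (dataset_file_names : List String) (dataset_short_names : List String) (out : List String) : Prop := out = get_dataset_names_ordered_the_same_as_dataset_file_names_alt dataset_file_names dataset_short_names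
instance (dataset_file_names : List String) (dataset_short_names : List String) (out : List String) : Decidable (Spec_get_dataset_names_ordered_the_same_as_dataset_file_names dataset_file_names dataset_short_names out) := by unfold Spec_get_dataset_names_ordered_the_same_as_dataset_file_names; infer_instance

-- ===== CLAIM (what is proved, stated in full; the proofs are below) =====
def Claim_equal_get_dataset_names_ordered_the_same_as_dataset_file_names : Prop := ∀ (dataset_file_names : List String) (dataset_short_names : List String), Dom_get_dataset_names_ordered_the_same_as_dataset_file_names dataset_file_names dataset_short_names → Spec_get_dataset_names_ordered_the_same_as_dataset_file_names dataset_file_names dataset_short_names (get_dataset_names_ordered_the_same_as_dataset_file_names dataset_file_names dataset_short_names)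

-- ===== LEMMAS AND PROOFS =====

-- prepending a name to the scanned list is an <|> on A's inner scan
theorem pvAInner_cons (fname nm : String) (ns : List String) :
    pvAInner fname (nm :: ns)
      = (if PySem.Str.isIn nm fname then some nm else none).orElse (fun _ => pvAInner fname ns) := by
  simp [pvAInner]
  split_ifs <;> simp

-- one of B's sweeps, pointwise: option-or with "nm if it matches"
theorem pvBSweep_entry (files : List String) (chosen : List (Option String)) (nm : String)
    (h : chosen.length = files.length) (i : Nat) (hi : i < files.length) :
    (pvBSweep files chosen nm)[i]'(by simp [pvBSweep, h]; omega)
      = (chosen[i]'(by omega)).orElse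
          (fun _ => if PySem.Str.isIn nm (files[i]'hi) then some nm else none) := by
  simp [pvBSweep]
  rcases hc : chosen[i]'(by omega) with _ | v
  · simp
  · simp [Option.orElse]

-- a table with no empty slot is pointwise fixed (orElse never fires)
theorem pvFull_char (ns : List String) (files : List String) (chosen : List (Option String))
    (h : chosen.length = files.length) (hfull : ¬ chosen.contains none) :
    chosen = (List.range files.length).map
          (fun i => ((chosen.getD i none).orElse (fun _ => pvAInner (files.getD i "") ns))) := by
  apply List.ext_getElem
  · simp [h]
  · intro i h1 h2
    have hi : i < files.length := by omega
    rw [List.getElem_map, List.getElem_range, List.getD_eq_getElem chosen none h1]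
    rcases hc : chosen[i]'h1 with _ | v
    · have hm : none ∈ chosen := hc ▸ List.getElem_mem h1
      simp at hfull
      exact absurd hm hfull
    · simp [Option.orElse]

-- invariant of B's sweep loop over the short names: the chosen table is A's inner scan applied pointwise
theorem pvB_fold_char (ns : List String) (files : List String) (chosen : List (Option String))
    (h : chosen.length = files.length) :
    pvBLoop files ns chosen
      = (List.range files.length).map
          (fun i => ((chosen.getD i none).orElse (fun _ => pvAInner (files.getD i "") ns))) := by
  induction ns generalizing chosen with
  | nil =>
    simp only [pvBLoop]
    apply List.ext_getElem
    · simp [h]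
    · intro i h1 h2
      have hi : i < files.length := by simpa using h2
      simp [pvAInner, List.getElem?_eq_getElem, h ▸ hi]
  | cons nm rest ih =>
    by_cases hfull : ¬ chosen.contains none
    · rw [show pvBLoop files (nm :: rest) chosen = chosen from by
        simp only [pvBLoop, if_pos hfull]]
      exact pvFull_char (nm :: rest) files chosen h hfull
    rw [show pvBLoop files (nm :: rest) chosen = pvBLoop files rest (pvBSweep files chosen nm)
          from by simp only [pvBLoop, if_neg hfull]]
    rw [ih _ (by simp [pvBSweep, h])]
    apply List.ext_getElem
    · simp
    · intro i h1 h2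
      simp only [List.getElem_map, List.getElem_range] at *
      have hi : i < files.length := by simpa using h1
      have hci : i < chosen.length := by omega
      rw [List.getD_eq_getElem (pvBSweep files chosen nm) none (by simp [pvBSweep]; omega),
          List.getD_eq_getElem chosen none hci,
          List.getD_eq_getElem files "" hi,
          pvBSweep_entry files chosen nm h i hi, pvAInner_cons]
      rcases chosen[i]'hci with _ | v <;> simp [Option.orElse]

-- A's outer fold is a filterMap of the inner scan
theorem pvA_fold (files ns : List String) (acc : List String) :
    files.foldl
      (fun acc fname => match pvAInner fname ns with | some nm => acc ++ [nm] | none => acc) acc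
      = acc ++ files.filterMap (fun f => pvAInner f ns) := by
  induction files generalizing acc with
  | nil => simp
  | cons f rest ih =>
    simp only [List.foldl_cons, List.filterMap_cons]
    rcases h : pvAInner f ns with _ | nm <;> simp [h, ih]

-- ===== VERDICT (by name: the statement is the Claim_ definition above) =====
theorem get_dataset_names_ordered_the_same_as_dataset_file_names_spec : Claim_equal_get_dataset_names_ordered_the_same_as_dataset_file_names := by
  intro files ns _
  show _ = _
  unfold get_dataset_names_ordered_the_same_as_dataset_file_names
    get_dataset_names_ordered_the_same_as_dataset_file_names_alt
  rw [pvA_fold, pvB_fold_char ns files _ (by simp)]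
  simp only [List.nil_append]
  have hmap : (List.range files.length).map
      (fun i => (((files.map (fun _ => (none : Option String))).getD i none).orElse
        (fun _ => pvAInner (files.getD i "") ns)))
      = files.map (fun f => pvAInner f ns) := by
    apply List.ext_getElem
    · simp
    · intro i h1 h2
      have hi : i < files.length := by simpa using h2
      simp [List.getD_eq_getElem files "" hi,
        List.getD_eq_getElem (files.map (fun _ => (none : Option String))) none (by simpa using hi),
        Option.orElse, List.getElem?_eq_getElem, hi]
  rw [hmap, List.filterMap_map]
  simp [Function.comp]
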